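-- pv_equiv track=rewrite | github.com/rickyng/optionTracker | app/parsers/csv_parser.py | _split_csv_sections
-- ===== SOURCE A (Python) =====
-- def _split_csv_sections(csv_content: str) -> dict[str, str]:
--     """Split a multi-section IBKR Flex CSV into named sections.
--
--     IBKR Flex reports can contain multiple sections (OpenPositions, Trades, etc.)
--     each starting with their own header row. Returns a dict mapping a section
--     identifier (based on the header's distinctive columns) to its CSV content
--     (header + data rows).
--     """
--     lines = csv_content.split("\n")
--     sections: list[tuple[list[str], list[str]]] = []  # (header_lines, data_lines)
--     current_header: list[str] = []
--     current_data: list[str] = []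
--
--     for line in lines:
--         stripped = line.strip()
--         if not stripped:
--             continue
--         # Detect a header row: starts with ClientAccountID (common first column)
--         if stripped.startswith('"ClientAccountID"') or stripped.startswith("ClientAccountID"):
--             # Save previous section if any
--             if current_header:
--                 sections.append((current_header, current_data))
--             current_header = [stripped]
--             current_data = []
--         elif current_header:
--             current_data.append(stripped)
--
--     # Don't forget the last section
--     if current_header:
--         sections.append((current_header, current_data))
--
--     result: dict[str, str] = {}
--     for header_lines, data_lines in sections:
--         header_str = header_lines[0]
--         # Identify section by its distinctive columns
--         if "OpenPrice" in header_str or "MarkPrice" in header_str: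
--             key = "positions"
--         elif "TradePrice" in header_str or "TradeDate" in header_str:
--             key = "trades"
--         else:
--             key = f"unknown_{len(result)}"
--         result[key] = "\n".join(header_lines + data_lines)
--
--     return result
-- ===== SOURCE B (Python) =====
-- def _split_csv_sections(csv_content: str) -> dict[str, str]:
--     """Single pass: classify each header as it is seen and grow the
--     current section's text in the result dict directly."""
--     result: dict[str, str] = {}
--     current_key = None
--     for line in csv_content.split("\n"):
--         stripped = line.strip()
--         if not stripped:
--             continue
--         if stripped.startswith('"ClientAccountID"') or stripped.startswith("ClientAccountID"):
--             if "OpenPrice" in stripped or "MarkPrice" in stripped: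
--                 current_key = "positions"
--             elif "TradePrice" in stripped or "TradeDate" in stripped:
--                 current_key = "trades"
--             else:
--                 current_key = f"unknown_{len(result)}"
--             result[current_key] = stripped
--         elif current_key is not None:
--             result[current_key] += "\n" + stripped
--     return result
-- ===== Notes on version B (the rewrite author's own statement) =====
-- stated objective: simpler
-- what changed: Replaced A's two-pass scheme (first collect (header_lines, data_lines) section pairs, then a second loop joining each section and building the dict) with a single pass over the lines that classifies each header as it is seen and grows the current section's text directly in the result dict.
import Mathlib
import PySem

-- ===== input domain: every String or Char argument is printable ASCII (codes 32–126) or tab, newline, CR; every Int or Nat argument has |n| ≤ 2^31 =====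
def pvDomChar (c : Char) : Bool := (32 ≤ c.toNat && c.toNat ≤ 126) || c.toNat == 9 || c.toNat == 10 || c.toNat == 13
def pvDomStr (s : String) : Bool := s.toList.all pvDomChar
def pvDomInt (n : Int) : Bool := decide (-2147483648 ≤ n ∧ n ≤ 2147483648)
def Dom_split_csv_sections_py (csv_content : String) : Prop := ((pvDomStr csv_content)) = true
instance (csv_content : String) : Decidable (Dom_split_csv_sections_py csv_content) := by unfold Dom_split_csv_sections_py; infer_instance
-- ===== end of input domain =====

-- B replaces A's two-pass scheme (collect (header, data) section pairs, then a second loop building the dict)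
-- by a single pass that keys each section at header time and grows its text in the dict directly; objective: simpler.

-- ===== PORT A =====
-- one iteration of A's line loop; state = (sections, current_header, current_data)
def pvAStep (st : List (List String × List String) × List String × List String) (line : String) :
    List (List String × List String) × List String × List String :=
  let stripped := PySem.Str.strip line
  if stripped = "" then st
  else if PySem.Str.startswith stripped "\"ClientAccountID\"" || PySem.Str.startswith stripped "ClientAccountID" then
    ((if st.2.1 ≠ [] then st.1 ++ [(st.2.1, st.2.2)] else st.1), [stripped], [])
  else if st.2.1 ≠ [] then (st.1, st.2.1, st.2.2 ++ [stripped])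
  else st

-- one iteration of A's second loop: result[key] = "\n".join(header_lines + data_lines)
def pvAEmit (r : PySem.Dict String String) (sec : List String × List String) : PySem.Dict String String :=
  let header_str := (PySem.List.pyGet? sec.1 0).getD ""
  let key :=
    if PySem.Str.isIn "OpenPrice" header_str || PySem.Str.isIn "MarkPrice" header_str then "positions"
    else if PySem.Str.isIn "TradePrice" header_str || PySem.Str.isIn "TradeDate" header_str then "trades"
    else "unknown_" ++ PySem.Int.toStr (r.size : Int)
  r.insert key (PySem.Str.join "\n" (sec.1 ++ sec.2))

def split_csv_sections_py (csv_content : String) : List (String × String) :=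
  let lines := (PySem.Str.split? csv_content "\n").getD []
  let st := lines.foldl pvAStep ([], [], [])
  let sections := if st.2.1 ≠ [] then st.1 ++ [(st.2.1, st.2.2)] else st.1
  (sections.foldl pvAEmit PySem.Dict.empty).items

-- ===== PORT B =====
-- one iteration of B's single loop; state = (result, current_key)
def pvBStep (st : PySem.Dict String String × Option String) (line : String) :
    PySem.Dict String String × Option String :=
  let stripped := PySem.Str.strip line
  if stripped = "" then st
  else if PySem.Str.startswith stripped "\"ClientAccountID\"" || PySem.Str.startswith stripped "ClientAccountID" then
    let key :=
      if PySem.Str.isIn "OpenPrice" stripped || PySem.Str.isIn "MarkPrice" stripped then "positions"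
      else if PySem.Str.isIn "TradePrice" stripped || PySem.Str.isIn "TradeDate" stripped then "trades"
      else "unknown_" ++ PySem.Int.toStr (st.1.size : Int)
    (st.1.insert key stripped, some key)
  else
    match st.2 with
    | some k => (st.1.modify k "" (fun v => v ++ "\n" ++ stripped), some k)
    | none => st

def split_csv_sections_py_alt (csv_content : String) : List (String × String) :=
  ((((PySem.Str.split? csv_content "\n").getD []).foldl pvBStep (PySem.Dict.empty, none)).1).items

-- ===== PRECONDITION & SPEC =====
def Spec_split_csv_sections_py (csv_content : String) (out : List (String × String)) : Prop := out = split_csv_sections_py_alt csv_content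
instance (csv_content : String) (out : List (String × String)) : Decidable (Spec_split_csv_sections_py csv_content out) := by unfold Spec_split_csv_sections_py; infer_instance

-- ===== CLAIM (what is proved, stated in full; the proofs are below) =====
def Claim_equal_split_csv_sections_py : Prop := ∀ (csv_content : String), Dom_split_csv_sections_py csv_content → Spec_split_csv_sections_py csv_content (split_csv_sections_py csv_content)

-- ===== LEMMAS AND PROOFS =====

-- the dict A's second loop builds from a section list
def pvDictOf (ss : List (List String × List String)) : PySem.Dict String String :=
  ss.foldl pvAEmit PySem.Dict.empty

-- the key both programs assign to a header line, given the dict size at that moment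
def pvKey (h : String) (n : Nat) : String :=
  if PySem.Str.isIn "OpenPrice" h || PySem.Str.isIn "MarkPrice" h then "positions"
  else if PySem.Str.isIn "TradePrice" h || PySem.Str.isIn "TradeDate" h then "trades"
  else "unknown_" ++ PySem.Int.toStr (n : Int)

-- invariant relating A's loop state to B's: B's dict is always A's dict-so-far
-- including the (partial) current section, and B's current key is that section's key
def pvRel (a : List (List String × List String) × List String × List String)
    (b : PySem.Dict String String × Option String) : Prop :=
  (a.2.1 = [] ∧ a.1 = [] ∧ b.1 = PySem.Dict.empty ∧ b.2 = none) ∨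
  (∃ h, a.2.1 = [h] ∧ b.1 = pvDictOf (a.1 ++ [([h], a.2.2)]) ∧
        b.2 = some (pvKey h (pvDictOf a.1).size))

theorem pvChJoin_append (sep h x : List Char) (l : List (List Char)) :
    PySem.Chars.join sep ((h :: l) ++ [x]) = PySem.Chars.join sep (h :: l) ++ sep ++ x := by
  induction l generalizing h with
  | nil => simp [PySem.Chars.join_cons_cons, PySem.Chars.join_singleton]
  | cons a l ih =>
      have := ih a
      simp only [List.cons_append] at *
      rw [PySem.Chars.join_cons_cons, PySem.Chars.join_cons_cons, this]
      simp [List.append_assoc]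

theorem pvJoin_append (h x : String) (l : List String) :
    PySem.Str.join "\n" ((h :: l) ++ [x]) = PySem.Str.join "\n" (h :: l) ++ "\n" ++ x := by
  apply String.ext
  simpa [PySem.Str.toList_join] using pvChJoin_append "\n".toList h.toList x.toList (l.map String.toList)

theorem pvJoin_singleton (sep s : String) : PySem.Str.join sep [s] = s :=
  String.ext (by simp [PySem.Str.toList_join, PySem.Chars.join_singleton])

theorem pvDictOf_append (ss : List (List String × List String)) (sec : List String × List String) :
    pvDictOf (ss ++ [sec]) = pvAEmit (pvDictOf ss) sec := by
  simp [pvDictOf, List.foldl_append]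

theorem pvAEmit_eq (r : PySem.Dict String String) (h : String) (ds : List String) :
    pvAEmit r ([h], ds) = r.insert (pvKey h r.size) (PySem.Str.join "\n" (h :: ds)) := rfl

theorem pvStep_rel (secs : List (List String × List String)) (ch cd : List String)
    (d : PySem.Dict String String) (ck : Option String) (line : String)
    (hr : pvRel (secs, ch, cd) (d, ck)) :
    pvRel (pvAStep (secs, ch, cd) line) (pvBStep (d, ck) line) := by
  by_cases hs : PySem.Str.strip line = ""
  · simpa [pvAStep, pvBStep, hs] using hr
  · by_cases hh : (PySem.Str.startswith (PySem.Str.strip line) "\"ClientAccountID\"" ||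
        PySem.Str.startswith (PySem.Str.strip line) "ClientAccountID") = true
    · -- header line: A flushes the current section and starts a new one;
      -- B inserts the new section's header under its key
      rcases hr with ⟨h1, h2, h3, h4⟩ | ⟨h, hch, hb1, hb2⟩
      · dsimp only at h1 h2 h3 h4
        subst h1 h2 h3 h4
        simp only [pvAStep, pvBStep]
        rw [if_neg hs, if_pos hh, if_neg hs, if_pos hh]
        refine Or.inr ⟨PySem.Str.strip line, by simp, ?_, ?_⟩
        · simp [pvDictOf, pvAEmit_eq, pvJoin_singleton, pvKey]
        · simp [pvDictOf, pvKey]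
      · dsimp only at hch hb1 hb2
        subst hch hb1 hb2
        simp only [pvAStep, pvBStep]
        rw [if_neg hs, if_pos hh, if_neg hs, if_pos hh]
        refine Or.inr ⟨PySem.Str.strip line, by simp, ?_, ?_⟩
        · simp only [ne_eq, reduceCtorEq, not_false_eq_true, if_true]
          rw [pvDictOf_append, pvDictOf_append, pvDictOf_append, pvAEmit_eq, pvAEmit_eq,
            pvJoin_singleton]
          simp [pvKey]
        · simp only [ne_eq, reduceCtorEq, not_false_eq_true, if_true]
          rw [pvDictOf_append, pvAEmit_eq]
          simp [pvKey]
    · -- ordinary data line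
      rcases hr with ⟨h1, h2, h3, h4⟩ | ⟨h, hch, hb1, hb2⟩
      · dsimp only at h1 h2 h3 h4
        subst h1 h2 h3 h4
        simp only [pvAStep, pvBStep]
        rw [if_neg hs, if_neg hh, if_neg hs, if_neg hh]
        exact Or.inl ⟨by simp, by simp, rfl, rfl⟩
      · dsimp only at hch hb1 hb2
        subst hch hb1 hb2
        simp only [pvAStep, pvBStep]
        rw [if_neg hs, if_neg hh, if_neg hs, if_neg hh]
        refine Or.inr ⟨h, by simp, ?_, ?_⟩
        · simp only [ne_eq, reduceCtorEq, not_false_eq_true, if_true]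
          rw [pvDictOf_append, pvDictOf_append, pvAEmit_eq, pvAEmit_eq, PySem.Dict.modify,
            PySem.Dict.getD_insert_self, PySem.Dict.insert_insert_self,
            show h :: (cd ++ [PySem.Str.strip line]) = (h :: cd) ++ [PySem.Str.strip line] from rfl,
            pvJoin_append]
        · simp only [ne_eq, reduceCtorEq, not_false_eq_true, if_true]

theorem pvFold_rel (lines : List String)
    (a : List (List String × List String) × List String × List String)
    (b : PySem.Dict String String × Option String) (hr : pvRel a b) :
    pvRel (lines.foldl pvAStep a) (lines.foldl pvBStep b) := by
  induction lines generalizing a b with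
  | nil => simpa using hr
  | cons l ls ih =>
      obtain ⟨secs, ch, cd⟩ := a
      obtain ⟨d, ck⟩ := b
      exact ih _ _ (pvStep_rel secs ch cd d ck l hr)

theorem pvRel_flush (a : List (List String × List String) × List String × List String)
    (b : PySem.Dict String String × Option String) (hr : pvRel a b) :
    pvDictOf (if a.2.1 ≠ [] then a.1 ++ [(a.2.1, a.2.2)] else a.1) = b.1 := by
  rcases hr with ⟨h1, h2, h3, _⟩ | ⟨h, hh, hb1, _⟩
  · simp [h1, h2, h3, pvDictOf]
  · simp [hh, hb1]

-- ===== VERDICT (by name: the statement is the Claim_ definition above) =====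
theorem split_csv_sections_py_spec : Claim_equal_split_csv_sections_py := by
  intro csv_content _
  unfold Spec_split_csv_sections_py split_csv_sections_py split_csv_sections_py_alt
  have h0 : pvRel ([], [], []) (PySem.Dict.empty, none) := Or.inl ⟨rfl, rfl, rfl, rfl⟩
  have hr := pvFold_rel ((PySem.Str.split? csv_content "\n").getD []) _ _ h0
  have hfl := pvRel_flush _ _ hr
  simp only [pvDictOf] at hfl
  simp only [hfl]
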